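-- pv_equiv track=rewrite | github.com/ericu9500/PapyriAndInscriptions | train_data/12_prepare_train_text_2.py | group_and_count
-- ===== SOURCE A (Python) =====
-- def group_and_count(segments):
--     grouped_sequences = []
--     current_type = None
--     current_group = []
--
--     for token in segments:
--         if "-" in token or "----------" in token:
--             token_type = "lost"
--         else:
--             token_type = "preserved"
--
--
--         if token_type == current_type:
--             current_group.append(token)
--         else:
--             if current_group:
--
--                 grouped_sequences.append((len(current_group), current_type, current_group))
--
--             current_type = token_type
--             current_group = [token]
--
--
--     if current_group:
--         grouped_sequences.append((len(current_group), current_type, current_group))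
--
--     return grouped_sequences
-- ===== SOURCE B (Python) =====
-- def _key(t):
--     return "lost" if "-" in t else "preserved"
--
-- def group_and_count(segments):
--     result = []
--     i = 0
--     n = len(segments)
--     while i < n:
--         k = _key(segments[i])
--         j = i + 1
--         while j < n and _key(segments[j]) == k:
--             j += 1
--         result.append((j - i, k, segments[i:j]))
--         i = j
--     return result
-- ===== Notes on version B (the rewrite author's own statement) =====
-- stated objective: alternative
-- what changed: A is a state machine carrying current_type/current_group and flushing on type change; B scans forward to the end of each maximal run with a second index and emits the slice directly (the redundant '----------' test is dropped since it is implied by '-').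
import Mathlib
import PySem

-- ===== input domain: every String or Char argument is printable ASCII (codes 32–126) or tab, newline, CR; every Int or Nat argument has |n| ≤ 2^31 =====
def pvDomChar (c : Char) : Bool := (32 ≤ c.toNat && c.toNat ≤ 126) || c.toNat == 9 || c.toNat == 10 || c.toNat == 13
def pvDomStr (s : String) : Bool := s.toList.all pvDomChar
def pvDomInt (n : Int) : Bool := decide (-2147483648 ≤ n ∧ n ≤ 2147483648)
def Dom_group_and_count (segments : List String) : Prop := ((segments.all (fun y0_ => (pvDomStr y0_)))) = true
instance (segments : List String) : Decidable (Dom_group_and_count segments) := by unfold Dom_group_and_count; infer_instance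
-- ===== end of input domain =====

-- B replaces A's current_type/current_group state machine with a direct scan that
-- slices out each maximal run of equally-typed tokens (alternative decomposition, same cost).


-- ===== PORT A =====
-- token's type as computed by A's branch: "-" in token or "----------" in token
def keyA (t : String) : String :=
  if PySem.Str.isIn "-" t || PySem.Str.isIn "----------" t then "lost" else "preserved"

-- A's loop: state = (accumulated result, current_type, current_group); final flush after the loop
def loopA : List String → List (Int × String × List String) → Option String → List String →
    List (Int × String × List String)
  | [], acc, ct, cg =>
      if cg.isEmpty then acc else acc ++ [((cg.length : Int), ct.getD "", cg)]
  | t :: ts, acc, ct, cg =>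
      let tt := keyA t
      if some tt = ct then
        loopA ts acc ct (cg ++ [t])
      else
        loopA ts (if cg.isEmpty then acc else acc ++ [((cg.length : Int), ct.getD "", cg)])
          (some tt) [t]

def group_and_count (segments : List String) : List (Int × String × List String) :=
  loopA segments [] none []

-- ===== PORT B =====
def keyB (t : String) : String :=
  if PySem.Str.isIn "-" t then "lost" else "preserved"

-- B: take the maximal run of tokens with the first token's key, emit it, recurse on the rest
def runsB : List String → List (Int × String × List String)
  | [] => []
  | t :: ts =>
      let k := keyB t
      let g := ts.takeWhile (fun x => keyB x == k)
      ((1 + g.length : Int), k, t :: g) :: runsB (ts.dropWhile (fun x => keyB x == k))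
termination_by l => l.length
decreasing_by
  simpa using Nat.lt_succ_of_le (List.length_dropWhile_le (fun x => keyB x == k) ts)

def group_and_count_alt (segments : List String) : List (Int × String × List String) :=
  runsB segments

-- ===== PRECONDITION & SPEC =====
def Spec_group_and_count (segments : List String) (out : List (Int × String × List String)) : Prop := out = group_and_count_alt segments
instance (segments : List String) (out : List (Int × String × List String)) : Decidable (Spec_group_and_count segments out) := by unfold Spec_group_and_count; infer_instance

-- ===== CLAIM (what is proved, stated in full; the proofs are below) =====
def Claim_equal_group_and_count : Prop := ∀ (segments : List String), Dom_group_and_count segments → Spec_group_and_count segments (group_and_count segments)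

-- ===== LEMMAS AND PROOFS =====

-- the "----------" disjunct in A's test is redundant: it implies "-" in token
theorem keyA_eq_keyB (t : String) : keyA t = keyB t := by
  unfold keyA keyB
  rcases h : PySem.Str.isIn "-" t with _ | _
  · rcases h10 : PySem.Str.isIn "----------" t with _ | _
    · simp
    · exfalso
      have hinf := (PySem.Str.isIn_iff_infix "----------" t).mp h10
      have h1 : ("-".toList) <:+: ("----------".toList) := by decide
      have h2 : PySem.Str.isIn "-" t = true :=
        (PySem.Str.isIn_iff_infix "-" t).mpr (h1.trans hinf)
      rw [h] at h2; cases h2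
  · simp

theorem takeWhile_all_append {α : Type} (p : α → Bool) (g : List α) (t : α) (ts : List α)
    (hg : ∀ x ∈ g, p x = true) (ht : p t = false) :
    (g ++ t :: ts).takeWhile p = g := by
  induction g with
  | nil => simp [ht]
  | cons c g ih =>
      simp [hg c (by simp)]
      exact ih (fun x hx => hg x (by simp [hx]))

theorem dropWhile_all_append {α : Type} (p : α → Bool) (g : List α) (t : α) (ts : List α)
    (hg : ∀ x ∈ g, p x = true) (ht : p t = false) :
    (g ++ t :: ts).dropWhile p = t :: ts := by
  induction g with
  | nil => simp [ht]
  | cons c g ih =>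
      simp [hg c (by simp)]
      exact ih (fun x hx => hg x (by simp [hx]))

theorem takeWhile_all {α : Type} (p : α → Bool) (g : List α) (hg : ∀ x ∈ g, p x = true) :
    g.takeWhile p = g := List.takeWhile_eq_self_iff.mpr hg

theorem dropWhile_all {α : Type} (p : α → Bool) (g : List α) (hg : ∀ x ∈ g, p x = true) :
    g.dropWhile p = [] := List.dropWhile_eq_nil_iff.mpr hg

-- runsB on a single homogeneous run
theorem runsB_homog (c : String) (g : List String)
    (hg : ∀ x ∈ c :: g, keyB x = keyB c) :
    runsB (c :: g) = [(((c :: g).length : Int), keyB c, c :: g)] := by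
  rw [runsB]
  have hall : ∀ x ∈ g, (fun x => keyB x == keyB c) x = true := by
    intro x hx; simp [hg x (by simp [hx])]
  rw [takeWhile_all _ g hall, dropWhile_all _ g hall, runsB]
  simp; omega

-- runsB peels a leading maximal homogeneous run
theorem runsB_peel (c : String) (g : List String) (t : String) (ts : List String)
    (hg : ∀ x ∈ c :: g, keyB x = keyB c) (ht : keyB t ≠ keyB c) :
    runsB (c :: g ++ t :: ts) =
      (((c :: g).length : Int), keyB c, c :: g) :: runsB (t :: ts) := by
  rw [show (c :: g ++ t :: ts) = c :: (g ++ t :: ts) by simp, runsB]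
  have hall : ∀ x ∈ g, (fun x => keyB x == keyB c) x = true := by
    intro x hx; simp [hg x (by simp [hx])]
  have htf : (fun x => keyB x == keyB c) t = false := by simp [ht]
  rw [takeWhile_all_append _ g t ts hall htf, dropWhile_all_append _ g t ts hall htf]
  simp; omega

-- main invariant: with a nonempty homogeneous current group, A's loop produces
-- the accumulator followed by B's runs of (group ++ remaining input)
theorem loopA_runs (ts : List String) :
    ∀ (k : String) (cg : List String) (acc : List (Int × String × List String)),
      (∀ x ∈ cg, keyB x = k) → cg ≠ [] →
      loopA ts acc (some k) cg = acc ++ runsB (cg ++ ts) := by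
  induction ts with
  | nil =>
      intro k cg acc hcg hne
      obtain ⟨c, g, rfl⟩ := List.exists_cons_of_ne_nil hne
      have hk : keyB c = k := hcg c (by simp)
      rw [loopA, List.append_nil, runsB_homog c g (by intro x hx; rw [hcg x hx, hk]), hk]
      simp
  | cons t ts ih =>
      intro k cg acc hcg hne
      obtain ⟨c, g, rfl⟩ := List.exists_cons_of_ne_nil hne
      have hk : keyB c = k := hcg c (by simp)
      rw [loopA]
      simp only [keyA_eq_keyB]
      by_cases htk : keyB t = k
      · simp only [htk]
        have : (c :: g) ++ [t] = c :: (g ++ [t]) := by simp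
        rw [this, ih k (c :: (g ++ [t])) acc
          (by intro x hx; simp at hx
              rcases hx with h | h | h
              · rw [h]; exact hk
              · exact hcg x (by simp [h])
              · rw [h]; exact htk)
          (by simp)]
        simp
      · have hne2 : ¬ (some (keyB t) = some k) := by simp [htk]
        simp only [if_neg hne2, List.isEmpty_cons, Bool.false_eq_true, if_false]
        rw [ih (keyB t) [t] _ (by intro x hx; simp at hx; rw [hx]) (by simp)]
        rw [show ((c :: g) ++ t :: ts) = (c :: g ++ t :: ts) by simp,
          runsB_peel c g t ts (by intro x hx; rw [hcg x hx, hk]) (by rw [hk]; exact htk)]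
        simp [hk]

-- ===== VERDICT (by name: the statement is the Claim_ definition above) =====
theorem group_and_count_spec : Claim_equal_group_and_count := by
  intro segments _
  unfold Spec_group_and_count group_and_count group_and_count_alt
  cases segments with
  | nil => rw [loopA, runsB]; rfl
  | cons t ts =>
      rw [loopA]
      simp only [keyA_eq_keyB]
      rw [loopA_runs ts (keyB t) [t] _ (by intro x hx; simp at hx; rw [hx]) (by simp)]
      simp
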